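-- pv_equiv track=rewrite | github.com/shreydevkar/gridos | core/engine.py | _unquote_string
-- ===== SOURCE A (Python) =====
-- _STRING_ESCAPES = {"\\n": "\n", "\\t": "\t", "\\\"": "\"", "\\'": "'", "\\\\": "\\"}
--
-- def _unquote_string(raw: str) -> str:
--     """Strip surrounding quotes and decode a small set of escapes."""
--     body = raw[1:-1]
--     if "\\" not in body:
--         return body
--     out = []
--     i = 0
--     while i < len(body):
--         if body[i] == "\\" and i + 1 < len(body):
--             pair = body[i:i + 2]
--             out.append(_STRING_ESCAPES.get(pair, pair[1]))
--             i += 2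
--         else:
--             out.append(body[i])
--             i += 1
--     return "".join(out)
-- ===== SOURCE B (Python) =====
-- _STRING_ESCAPES = {"\\n": "\n", "\\t": "\t", "\\\"": "\"", "\\'": "'", "\\\\": "\\"}
--
-- def _unquote_string(raw: str) -> str:
--     """Strip surrounding quotes and decode escapes with a one-pass pending-backslash state machine."""
--     out = []
--     pending = False
--     for ch in raw[1:-1]:
--         if pending:
--             out.append(_STRING_ESCAPES.get("\\" + ch, ch))
--             pending = False
--         elif ch == "\\":
--             pending = True
--         else:
--             out.append(ch)
--     if pending:
--         out.append("\\")
--     return "".join(out)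
-- ===== Notes on version B (the rewrite author's own statement) =====
-- stated objective: simpler
-- what changed: Replaced the index-based while loop with lookahead (body[i], i+1<len, body[i:i+2] slicing, and a separate early return when no backslash is present) by a single direct for-loop over the characters carrying a pending-backslash flag, flushing a lone trailing backslash at the end.
import Mathlib
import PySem

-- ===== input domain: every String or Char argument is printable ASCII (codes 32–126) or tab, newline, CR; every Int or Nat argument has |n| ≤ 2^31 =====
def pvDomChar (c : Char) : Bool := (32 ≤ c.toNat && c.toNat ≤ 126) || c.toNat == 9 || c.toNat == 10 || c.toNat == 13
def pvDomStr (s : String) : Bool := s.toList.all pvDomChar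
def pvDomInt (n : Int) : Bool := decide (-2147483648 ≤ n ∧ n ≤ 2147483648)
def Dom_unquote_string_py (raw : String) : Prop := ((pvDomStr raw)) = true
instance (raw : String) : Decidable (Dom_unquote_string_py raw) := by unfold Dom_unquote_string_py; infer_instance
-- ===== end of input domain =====

-- B replaces A's index-based while-loop (slicing/lookahead, early no-backslash return) with a single-pass
-- pending-backslash state machine over the characters; same return value everywhere, similar cost.

-- _STRING_ESCAPES, shared module constant of both Pythons; strings represented as code-point lists
def pvEscTable : PySem.Dict (List Char) (List Char) :=
  PySem.Dict.mk [(['\\','n'], ['\n']), (['\\','t'], ['\t']), (['\\','"'], ['"']),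
                 (['\\','\''], ['\'']), (['\\','\\'], ['\\'])]

-- ===== PORT A =====
-- A's while loop over index i: [c] = the 'i+1 < len(body)' test failing, c::d::rest = i with a successor
def unqA_loop : List Char → List (List Char)
  | [] => []
  | [c] => [[c]]
  | c :: d :: rest =>
    if c = '\\' then pvEscTable.getD [c, d] [d] :: unqA_loop rest
    else [c] :: unqA_loop (d :: rest)

def unquote_string_py (raw : String) : String :=
  let body := PySem.Chars.slice raw.toList (some 1) (some (-1))
  if PySem.Chars.isIn ['\\'] body = false then String.ofList body
  else String.ofList (unqA_loop body).flatten

-- ===== PORT B =====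
-- B's for loop with the 'pending' flag, plus the final lone-backslash flush
def unqB_loop (pending : Bool) : List Char → List (List Char)
  | [] => if pending then [['\\']] else []
  | c :: rest =>
    if pending then pvEscTable.getD ('\\' :: [c]) [c] :: unqB_loop false rest
    else if c = '\\' then unqB_loop true rest
    else [c] :: unqB_loop false rest

def unquote_string_py_alt (raw : String) : String :=
  String.ofList (unqB_loop false (PySem.Chars.slice raw.toList (some 1) (some (-1)))).flatten

-- ===== PRECONDITION & SPEC =====
def Spec_unquote_string_py (raw : String) (out : String) : Prop := out = unquote_string_py_alt raw
instance (raw : String) (out : String) : Decidable (Spec_unquote_string_py raw out) := by unfold Spec_unquote_string_py; infer_instance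

-- ===== CLAIM (what is proved, stated in full; the proofs are below) =====
def Claim_equal_unquote_string_py : Prop := ∀ (raw : String), Dom_unquote_string_py raw → Spec_unquote_string_py raw (unquote_string_py raw)

-- ===== LEMMAS AND PROOFS =====

-- the two loops agree: pending=false tracks A's loop, pending=true is A's loop one char behind a backslash
theorem unqB_eq_unqA (l : List Char) :
    unqB_loop false l = unqA_loop l ∧
    unqB_loop true l = (match l with
      | [] => [['\\']]
      | d :: rest => pvEscTable.getD ['\\', d] [d] :: unqA_loop rest) := by
  induction l with
  | nil => simp [unqB_loop, unqA_loop]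
  | cons c rest ih =>
    refine ⟨?_, ?_⟩
    · by_cases hc : c = '\\'
      · subst hc
        simp only [unqB_loop, if_true, Bool.false_eq_true, if_false, ih.2]
        cases rest with
        | nil => simp [unqA_loop]
        | cons d r => simp [unqA_loop]
      · simp only [unqB_loop, Bool.false_eq_true, if_false, if_neg hc, ih.1]
        cases rest with
        | nil => simp [unqA_loop]
        | cons d r => simp [unqA_loop, hc]
    · simp [unqB_loop, ih.1]

-- on a backslash-free body A's loop is the identity (character by character)
theorem unqA_loop_no_bs (l : List Char) (h : '\\' ∉ l) : (unqA_loop l).flatten = l := by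
  induction l using unqA_loop.induct with
  | case1 => simp [unqA_loop]
  | case2 c => simp [unqA_loop]
  | case3 x y ih => simp at h
  | case4 c d rest hc ih =>
    simp only [unqA_loop, if_neg hc, List.flatten_cons]
    rw [ih (fun hm => h (List.mem_cons_of_mem _ hm))]
    rfl

-- ===== VERDICT (by name: the statement is the Claim_ definition above) =====
theorem unquote_string_py_spec : Claim_equal_unquote_string_py := by
  intro raw _
  unfold Spec_unquote_string_py unquote_string_py unquote_string_py_alt
  set body := PySem.Chars.slice raw.toList (some 1) (some (-1)) with hbody
  rw [(unqB_eq_unqA body).1]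
  by_cases h : PySem.Chars.isIn ['\\'] body = false
  · rw [if_pos h, unqA_loop_no_bs]
    intro hmem
    rw [← Bool.not_eq_true, PySem.Chars.isIn_iff_infix] at h
    exact h ((List.singleton_infix_iff '\\' body).mpr hmem)
  · rw [if_neg h]
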